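-- pv_equiv track=rewrite | github.com/mbrosenuw/dmsklone | Code/Hamiltonians/torham.py | gettorblocks3
-- ===== SOURCE A (Python) =====
-- def gettorblocks3(basis):
--     blocks = {}
--     for idx, (m, l) in enumerate(basis):
--         if (l) not in blocks:
--             blocks[(l)] = {"start": idx, "end": idx, "count": 1}
--         else:
--             blocks[(l)]["end"] = idx
--             blocks[(l)]["count"] += 1
--     return blocks
-- ===== SOURCE B (Python) =====
-- def gettorblocks3(basis):
--     groups = {}
--     for idx, (m, l) in enumerate(basis):
--         groups.setdefault(l, []).append(idx)
--     return {l: {"start": idxs[0], "end": idxs[-1], "count": len(idxs)}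
--             for l, idxs in groups.items()}
-- ===== Notes on version B (the rewrite author's own statement) =====
-- stated objective: alternative
-- what changed: B first groups all indices per l into lists (one setdefault/append pass), then summarizes each group in a dict comprehension taking first index, last index and length, instead of A's inline start/end/count bookkeeping per element.
import Mathlib
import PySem

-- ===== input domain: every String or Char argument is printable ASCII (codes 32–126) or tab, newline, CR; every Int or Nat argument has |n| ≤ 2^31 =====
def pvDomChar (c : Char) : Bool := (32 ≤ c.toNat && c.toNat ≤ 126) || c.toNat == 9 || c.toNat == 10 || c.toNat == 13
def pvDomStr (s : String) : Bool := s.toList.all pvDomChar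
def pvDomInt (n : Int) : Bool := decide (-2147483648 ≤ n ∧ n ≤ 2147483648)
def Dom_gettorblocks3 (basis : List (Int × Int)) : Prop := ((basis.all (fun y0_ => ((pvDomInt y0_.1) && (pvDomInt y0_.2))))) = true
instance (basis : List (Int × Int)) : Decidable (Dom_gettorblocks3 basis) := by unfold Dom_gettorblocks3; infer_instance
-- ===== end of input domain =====

-- B groups indices per l into lists first, then summarizes each group (first, last, length); alternative decomposition, same cost.


-- ===== PORT A =====
-- literal port of A: one dict `blocks`; the returned dict-of-dicts becomes its items with inner items.
def gettorblocks3 (basis : List (Int × Int)) : List (Int × List (String × Int)) :=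
  let blocks : PySem.Dict Int (PySem.Dict String Int) :=
    (PySem.List.enumerate basis 0).foldl (fun blocks p =>
      if blocks.contains p.2.2 = false then
        blocks.insert p.2.2 (PySem.Dict.ofList [("start", p.1), ("end", p.1), ("count", 1)])
      else
        -- blocks[l]["end"] = idx ; blocks[l]["count"] += 1  (in-place mutation of the inner dict)
        ((blocks.modify p.2.2 PySem.Dict.empty (fun d => d.insert "end" p.1)).modify p.2.2 PySem.Dict.empty
          (fun d => d.insert "count" (d.getD "count" 0 + 1)))) PySem.Dict.empty
  blocks.items.map (fun p => (p.1, p.2.items))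

-- ===== PORT B =====
-- literal port of B: group indices per l, then summarize. idxs[0] / idxs[-1] are headD/getLastD: every group is nonempty.
def gettorblocks3_alt (basis : List (Int × Int)) : List (Int × List (String × Int)) :=
  let groups : PySem.Dict Int (List Int) :=
    (PySem.List.enumerate basis 0).foldl (fun g p => g.modify p.2.2 [] (· ++ [p.1])) PySem.Dict.empty
  groups.items.map (fun p =>
    (p.1, [("start", p.2.headD 0), ("end", p.2.getLastD 0), ("count", (p.2.length : Int))]))

-- ===== PRECONDITION & SPEC =====
def Spec_gettorblocks3 (basis : List (Int × Int)) (out : List (Int × List (String × Int))) : Prop := out = gettorblocks3_alt basis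
instance (basis : List (Int × Int)) (out : List (Int × List (String × Int))) : Decidable (Spec_gettorblocks3 basis out) := by unfold Spec_gettorblocks3; infer_instance

-- ===== CLAIM (what is proved, stated in full; the proofs are below) =====
def Claim_equal_gettorblocks3 : Prop := ∀ (basis : List (Int × Int)), Dom_gettorblocks3 basis → Spec_gettorblocks3 basis (gettorblocks3 basis)

-- ===== LEMMAS AND PROOFS =====

-- the summary B computes from a group, as an inner dict value
def pvSumm (idxs : List Int) : PySem.Dict String Int :=
  PySem.Dict.mk [("start", idxs.headD 0), ("end", idxs.getLastD 0), ("count", (idxs.length : Int))]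

-- A's accumulator as the image of B's accumulator
def pvConv (g : PySem.Dict Int (List Int)) : PySem.Dict Int (PySem.Dict String Int) :=
  PySem.Dict.mk (g.items.map (fun p => (p.1, pvSumm p.2)))

lemma pvConv_contains (g : PySem.Dict Int (List Int)) (l : Int) :
    (pvConv g).contains l = g.contains l := by
  simp [pvConv, PySem.Dict.contains, List.any_map, Function.comp_def]

lemma pvConv_keys (g : PySem.Dict Int (List Int)) :
    (pvConv g).keys = g.keys := by
  simp [pvConv, PySem.Dict.keys, List.map_map, Function.comp_def]

lemma pvSumm_append (idxs : List Int) (idx : Int) (h : idxs ≠ []) :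
    pvSumm (idxs ++ [idx]) =
      PySem.Dict.mk [("start", idxs.headD 0), ("end", idx), ("count", (idxs.length : Int) + 1)] := by
  cases idxs with
  | nil => exact absurd rfl h
  | cons a t =>
    have hlast : (a :: (t ++ [idx])).getLast?.getD 0 = idx := by
      rw [← List.cons_append, List.getLast?_concat]; rfl
    simp only [pvSumm, List.cons_append, List.headD, List.length_append,
      List.length_cons, List.length_nil]
    push_cast
    norm_num [List.getLastD, hlast]

lemma pvStep_eq (g : PySem.Dict Int (List Int)) (idx l : Int)
    (hnd : g.keys.Nodup) (hne : ∀ p ∈ g.items, p.2 ≠ []) :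
    (if (pvConv g).contains l = false then
        (pvConv g).insert l (PySem.Dict.ofList [("start", idx), ("end", idx), ("count", 1)])
      else
        (((pvConv g).modify l PySem.Dict.empty (fun d => d.insert "end" idx)).modify l PySem.Dict.empty
          (fun d => d.insert "count" (d.getD "count" 0 + 1))))
    = pvConv (g.modify l [] (· ++ [idx])) := by
  rw [pvConv_contains]
  by_cases hc : g.contains l = true
  · -- key already present
    rw [hc, if_neg (by simp)]
    have hl : l ∈ g.keys := (PySem.Dict.contains_iff_mem_keys g l).mp hc
    obtain ⟨idxs, hp0⟩ : ∃ x, (l, x) ∈ g.items := by simpa [PySem.Dict.keys] using hl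
    have hgetD : g.getD l [] = idxs := PySem.Dict.getD_of_mem_items _ hp0 hnd _
    have hmemc : (l, pvSumm idxs) ∈ (pvConv g).items :=
      List.mem_map.mpr ⟨(l, idxs), hp0, rfl⟩
    have hndc : (pvConv g).keys.Nodup := by rw [pvConv_keys]; exact hnd
    have hgetDc : (pvConv g).getD l PySem.Dict.empty = pvSumm idxs :=
      PySem.Dict.getD_of_mem_items _ hmemc hndc _
    rw [PySem.Dict.modify, PySem.Dict.modify, hgetDc, PySem.Dict.getD_insert_self,
        PySem.Dict.insert_insert_self]
    have hne0 : idxs ≠ [] := hne _ hp0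
    have hfinal : ((pvSumm idxs).insert "end" idx).insert "count"
        (((pvSumm idxs).insert "end" idx).getD "count" 0 + 1) = pvSumm (idxs ++ [idx]) := by
      rw [pvSumm_append idxs idx hne0]; rfl
    rw [hfinal]
    have hcc : (pvConv g).contains l = true := by rw [pvConv_contains]; exact hc
    rw [PySem.Dict.modify, hgetD]
    apply PySem.Dict.ext
    rw [PySem.Dict.items_insert_of_contains _ _ hcc]
    simp only [pvConv]
    rw [PySem.Dict.items_insert_of_contains _ _ hc]
    show ((g.items.map _).map _ : List (Int × PySem.Dict String Int)) = (g.items.map _).map _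
    rw [List.map_map, List.map_map]
    apply List.map_congr_left
    intro p hp
    by_cases hpl : (p.1 == l) = true
    · have hinj := List.inj_on_of_nodup_map (by simpa [PySem.Dict.keys] using hnd)
      have hpeq : p = (l, idxs) := by
        have h1 : p.1 = l := by simpa using hpl
        have h2 : p.1 = ((l, idxs) : Int × List Int).1 := h1
        exact hinj hp hp0 h2
      subst hpeq
      simp
    · have hne' : p.1 ≠ l := by simpa using hpl
      simp [hne']
  · -- new key
    have hc' : g.contains l = false := by simpa using hc
    rw [hc', if_pos rfl]
    have hgetD : g.getD l [] = [] := PySem.Dict.getD_of_not_contains g [] hc'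
    rw [PySem.Dict.modify, hgetD]
    apply PySem.Dict.ext
    have hcc : (pvConv g).contains l = false := by rw [pvConv_contains]; exact hc'
    rw [PySem.Dict.items_insert_of_not_contains _ _ hcc]
    simp only [pvConv, List.nil_append]
    rw [PySem.Dict.items_insert_of_not_contains _ _ hc']
    show (g.items.map _) ++ _ = (g.items ++ _).map _
    rw [List.map_append]
    rfl

lemma pvNodup (g : PySem.Dict Int (List Int)) (l idx : Int) (h : g.keys.Nodup) :
    (g.modify l [] (· ++ [idx])).keys.Nodup := by
  rw [PySem.Dict.modify]
  exact PySem.Dict.nodup_keys_insert _ _ _ h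

lemma pvNe (g : PySem.Dict Int (List Int)) (l idx : Int)
    (hne : ∀ p ∈ g.items, p.2 ≠ []) :
    ∀ p ∈ (g.modify l [] (· ++ [idx])).items, p.2 ≠ [] := by
  intro p hp
  rw [PySem.Dict.modify] at hp
  rcases (PySem.Dict.mem_items_insert _ _ _ _).mp hp with h | ⟨h, _⟩
  · subst h; simp
  · exact hne _ h

lemma pvMain (xs : List (Int × Int)) : ∀ (s : Int) (g : PySem.Dict Int (List Int)),
    g.keys.Nodup → (∀ p ∈ g.items, p.2 ≠ []) →
    (PySem.List.enumerate xs s).foldl (fun blocks p =>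
      if blocks.contains p.2.2 = false then
        blocks.insert p.2.2 (PySem.Dict.ofList [("start", p.1), ("end", p.1), ("count", 1)])
      else
        ((blocks.modify p.2.2 PySem.Dict.empty (fun d => d.insert "end" p.1)).modify p.2.2 PySem.Dict.empty
          (fun d => d.insert "count" (d.getD "count" 0 + 1)))) (pvConv g)
    = pvConv ((PySem.List.enumerate xs s).foldl (fun g p => g.modify p.2.2 [] (· ++ [p.1])) g) := by
  induction xs with
  | nil => intro s g _ _; simp [PySem.List.enumerate_nil]
  | cons a xs ih =>
    intro s g hnd hne
    rw [PySem.List.enumerate_cons, List.foldl_cons, List.foldl_cons]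
    rw [pvStep_eq g s a.2 hnd hne]
    exact ih (s + 1) _ (pvNodup g a.2 s hnd) (pvNe g a.2 s hne)

-- ===== VERDICT (by name: the statement is the Claim_ definition above) =====
theorem gettorblocks3_spec : Claim_equal_gettorblocks3 := by
  intro basis _
  show _ = _
  unfold gettorblocks3 gettorblocks3_alt
  have h := pvMain basis 0 PySem.Dict.empty (by simp [PySem.Dict.keys_empty]) (by simp [PySem.Dict.empty])
  have hc : pvConv PySem.Dict.empty = PySem.Dict.empty := rfl
  rw [hc] at h
  rw [h]
  simp [pvConv, pvSumm, List.map_map, Function.comp]
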